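-- pv_equiv track=rewrite | github.com/thelilh/Melee-Modding-Wizard | FileSystem/hsdStructures.py | getMipmapLength
-- ===== SOURCE A (Python) =====
-- def getMipmapLength( baseLevelSize, maxLOD ):
--
-- 	""" Calculates the total size of an image and all of its mipmap levels. """
--
-- 	totalSize = baseLevelSize
--
-- 	for mipmapDepth in range( 1, int(maxLOD) ):
-- 		textureSize = baseLevelSize >> ( mipmapDepth * 2 )
--
-- 		if textureSize < 0x20:
-- 			totalSize += 0x20 # A texture can't be smaller than this
-- 		else:
-- 			totalSize += textureSize
--
-- 	return totalSize
-- ===== SOURCE B (Python) =====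
-- def getMipmapLength(baseLevelSize, maxLOD):
--     """ Same total, but stops as soon as the shifted size drops below 0x20
--         (it is monotone non-increasing past that point) and adds the
--         remaining capped levels in one multiplication. """
--     total = baseLevelSize
--     m = int(maxLOD)
--     d = 1
--     while d < m:
--         textureSize = baseLevelSize >> (d * 2)
--         if textureSize < 0x20:
--             break
--         total += textureSize
--         d += 1
--     if d < m:
--         total += (m - d) * 0x20
--     return total
-- ===== Notes on version B (the rewrite author's own statement) =====
-- stated objective: faster
-- what changed: B stops the loop as soon as the shifted texture size falls below 0x20 (it stays below from then on) and adds the remaining capped levels as (m-d)*0x20 in one step, instead of A's loop over every mipmap level.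
import Mathlib
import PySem

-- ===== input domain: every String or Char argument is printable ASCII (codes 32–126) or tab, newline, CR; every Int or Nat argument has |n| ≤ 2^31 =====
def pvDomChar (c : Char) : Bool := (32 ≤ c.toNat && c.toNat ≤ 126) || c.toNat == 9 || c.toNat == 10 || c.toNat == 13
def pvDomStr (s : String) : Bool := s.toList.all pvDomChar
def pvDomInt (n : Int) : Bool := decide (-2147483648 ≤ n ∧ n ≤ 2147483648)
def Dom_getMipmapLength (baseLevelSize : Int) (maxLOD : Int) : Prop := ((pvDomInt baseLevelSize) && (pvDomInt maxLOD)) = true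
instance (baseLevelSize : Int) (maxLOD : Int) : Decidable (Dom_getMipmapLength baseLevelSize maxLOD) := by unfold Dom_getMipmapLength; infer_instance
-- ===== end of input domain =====

-- B ends its loop once the shifted size drops below 0x20 (it stays below from then on) and adds the remaining capped levels in one multiplication; same value, fewer iterations.

-- ===== PORT A =====
-- Python's '>>' on ints is Lean's Int '>>>' (arithmetic shift); the shift amount d*2 is always ≥ 2 here.
def getMipmapLength (baseLevelSize : Int) (maxLOD : Int) : Int :=
  (PySem.List.pyRange 1 maxLOD 1).foldl
    (fun totalSize mipmapDepth =>
      let textureSize := baseLevelSize >>> (mipmapDepth * 2)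
      if textureSize < 0x20 then totalSize + 0x20 else totalSize + textureSize)
    baseLevelSize

-- ===== PORT B =====
-- the 'while d < m' loop of Source B; on 'break' (textureSize < 0x20) it returns with the one-shot '(m - d) * 0x20' already added
def mipLoop (baseLevelSize m total d : Int) : Int :=
  if _h : d < m then
    let textureSize := baseLevelSize >>> (d * 2)
    if textureSize < 0x20 then total + (m - d) * 0x20
    else mipLoop baseLevelSize m (total + textureSize) (d + 1)
  else total
termination_by (m - d).toNat
decreasing_by omega

def getMipmapLength_alt (baseLevelSize : Int) (maxLOD : Int) : Int :=
  mipLoop baseLevelSize maxLOD baseLevelSize 1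

-- ===== PRECONDITION & SPEC =====
def Spec_getMipmapLength (baseLevelSize : Int) (maxLOD : Int) (out : Int) : Prop := out = getMipmapLength_alt baseLevelSize maxLOD
instance (baseLevelSize : Int) (maxLOD : Int) (out : Int) : Decidable (Spec_getMipmapLength baseLevelSize maxLOD out) := by unfold Spec_getMipmapLength; infer_instance

-- ===== CLAIM (what is proved, stated in full; the proofs are below) =====
def Claim_equal_getMipmapLength : Prop := ∀ (baseLevelSize : Int) (maxLOD : Int), Dom_getMipmapLength baseLevelSize maxLOD → Spec_getMipmapLength baseLevelSize maxLOD (getMipmapLength baseLevelSize maxLOD)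

-- ===== LEMMAS AND PROOFS =====

theorem shift_toNat (b e : Int) (h : 0 ≤ e) : b >>> e = b >>> e.toNat := by
  have he : e = ((e.toNat : Nat) : Int) := by omega
  conv_lhs => rw [he]
  exact Int.shiftRight_natCast_right b e.toNat

-- once the shifted size is below 0x20 it stays below for any larger depth
theorem shift_small_mono (b d d' : Int) (h1 : 0 ≤ d) (h2 : d ≤ d')
    (hs : b >>> (d * 2) < 0x20) : b >>> (d' * 2) < 0x20 := by
  rw [shift_toNat b (d * 2) (by omega)] at hs
  rw [shift_toNat b (d' * 2) (by omega)]
  have hk : (d' * 2).toNat = (d * 2).toNat + ((d' - d) * 2).toNat := by omega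
  rw [hk, Int.shiftRight_add, Int.shiftRight_eq_div_pow]
  rcases le_or_gt 0 (b >>> (d * 2).toNat) with hp | hn
  · calc b >>> (d * 2).toNat / ((2 ^ ((d' - d) * 2).toNat : Nat) : Int)
        ≤ b >>> (d * 2).toNat := by
          push_cast
          exact Int.ediv_le_self _ hp
      _ < 0x20 := hs
  · have : b >>> (d * 2).toNat / ((2 ^ ((d' - d) * 2).toNat : Nat) : Int) ≤ 0 := by
      push_cast
      have hpos : (0:Int) < 2 ^ ((d' - d) * 2).toNat := by positivity
      simpa using Int.ediv_le_ediv hpos (le_of_lt hn)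
    omega

-- once small, the rest of A's fold adds exactly 0x20 per remaining level
theorem fold_small (b m : Int) : ∀ (d total : Int), 0 ≤ d → d ≤ m →
    b >>> (d * 2) < 0x20 →
    (PySem.List.pyRange d m 1).foldl
      (fun totalSize mipmapDepth =>
        let textureSize := b >>> (mipmapDepth * 2)
        if textureSize < 0x20 then totalSize + 0x20 else totalSize + textureSize)
      total = total + (m - d) * 0x20 := by
  intro d total hd hdm hs
  induction hn : (m - d).toNat generalizing d total with
  | zero =>
    have hba : m ≤ d := by omega
    rw [PySem.List.pyRange_one_eq_nil hba]
    simp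
    omega
  | succ n ih =>
    have hab : d < m := by omega
    rw [PySem.List.pyRange_one_cons hab]
    simp only [List.foldl_cons]
    rw [if_pos hs]
    rw [ih (d + 1) (total + 0x20) (by omega) (by omega)
        (shift_small_mono b d (d + 1) hd (by omega) hs) (by omega)]
    ring

-- main invariant: A's fold from depth d equals B's loop from depth d
theorem fold_eq_loop (b m : Int) : ∀ (d total : Int), 1 ≤ d →
    (PySem.List.pyRange d m 1).foldl
      (fun totalSize mipmapDepth =>
        let textureSize := b >>> (mipmapDepth * 2)
        if textureSize < 0x20 then totalSize + 0x20 else totalSize + textureSize)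
      total = mipLoop b m total d := by
  intro d total hd
  induction hn : (m - d).toNat generalizing d total with
  | zero =>
    have hba : m ≤ d := by omega
    rw [PySem.List.pyRange_one_eq_nil hba, mipLoop]
    simp [not_lt.mpr hba]
  | succ n ih =>
    have hab : d < m := by omega
    rw [mipLoop, dif_pos hab]
    by_cases hs : b >>> (d * 2) < 0x20
    · simp only [if_pos hs]
      exact fold_small b m d total (by omega) (le_of_lt hab) hs
    · simp only [if_neg hs]
      rw [PySem.List.pyRange_one_cons hab]
      simp only [List.foldl_cons]
      rw [if_neg hs]
      exact ih (d + 1) (total + b >>> (d * 2)) (by omega) (by omega)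

-- ===== VERDICT (by name: the statement is the Claim_ definition above) =====
theorem getMipmapLength_spec : Claim_equal_getMipmapLength := by
  intro b m _
  unfold Spec_getMipmapLength getMipmapLength getMipmapLength_alt
  exact fold_eq_loop b m 1 b le_rfl
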